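-- pv_equiv track=rewrite | github.com/5l1v3r1/locasploit | source/libs/search.py | search_abbr
-- ===== SOURCE A (Python) =====
-- def search_abbr(keyword, data):
-- 	# search for abbreviations
-- 	# linux.enumeration.kernel can be searched as linux.e, l.e.k, li etc. if not ambiguous
--
-- 	ref_parts = list(filter(None, keyword.split('.')))
-- 	parts = {}
-- 	# select all modules with more or equal parts than the searched expression
-- 	for i in data:
-- 		p = list(filter(None, i.split('.')))
-- 		if len(ref_parts) <= len(p):
-- 			parts[i]=p
--
-- 	# find matching modules for each part
-- 	toremove = []
-- 	for p in parts: # for each splitted module name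
-- 		for i in range(0, len(ref_parts)): # for the number of parts in query
-- 			if parts[p][i][:len(ref_parts[i])] != ref_parts[i]: # discrepancy on the ith part
-- 				toremove.append(p)
-- 				break
-- 	for p in toremove:
-- 		del parts[p]
-- 	return list(parts)
-- ===== SOURCE B (Python) =====
-- def search_abbr(keyword, data):
--     # progressive narrowing: one filtering stage per keyword part over a candidate
--     # pool of (name, remaining parts); then an order-preserving dedup with a seen set
--     pool = [(name, [x for x in name.split('.') if x]) for name in data]
--     for r in filter(None, keyword.split('.')):
--         pool = [(name, rest[1:]) for name, rest in pool
--                 if rest and rest[0].startswith(r)]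
--     out, seen = [], set()
--     for name, _ in pool:
--         if name not in seen:
--             seen.add(name)
--             out.append(name)
--     return out
-- ===== Notes on version B (the rewrite author's own statement) =====
-- stated objective: alternative
-- what changed: Instead of testing each name against all keyword parts (dict-build, per-key inner index loop, prune, delete), B transposes the loops: it keeps a candidate pool of (name, remaining parts) pairs and runs one narrowing stage per keyword part, each stage keeping the candidates whose next part starts with that keyword part and consuming it; a final pass dedups the surviving names order-preservingly with an explicit seen set.
import Mathlib
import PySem

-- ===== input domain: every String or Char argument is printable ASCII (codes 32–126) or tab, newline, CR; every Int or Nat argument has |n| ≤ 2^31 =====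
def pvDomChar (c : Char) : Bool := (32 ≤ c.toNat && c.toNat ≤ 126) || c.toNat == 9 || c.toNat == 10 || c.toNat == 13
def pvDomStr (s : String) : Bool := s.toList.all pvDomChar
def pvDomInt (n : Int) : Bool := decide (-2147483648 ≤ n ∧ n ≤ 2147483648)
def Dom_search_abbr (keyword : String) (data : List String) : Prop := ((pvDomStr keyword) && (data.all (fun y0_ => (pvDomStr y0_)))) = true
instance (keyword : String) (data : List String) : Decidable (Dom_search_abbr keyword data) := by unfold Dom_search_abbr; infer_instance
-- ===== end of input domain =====

-- B transposes A's loops: instead of A's dict-build / per-key index loop / prune / delete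
-- pipeline, B narrows a candidate pool with one filtering stage per keyword part and then
-- dedups the survivors order-preservingly (objective: alternative, same cost).

-- ===== PORT A =====
-- list(filter(None, s.split('.'))) — the split both Pythons use verbatim
def pvSplitNE (s : String) : List String :=
  ((PySem.Chars.splitOn s.toList ['.']).map String.ofList).filter (fun x => !(x == ""))

def search_abbr (keyword : String) (data : List String) : List String :=
  let ref_parts := pvSplitNE keyword
  -- for i in data: parts[i] = p if len(ref_parts) <= len(p)
  let parts : PySem.Dict String (List String) :=
    data.foldl (fun parts i =>
      let p := pvSplitNE i
      if ref_parts.length ≤ p.length then parts.insert i p else parts) PySem.Dict.empty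
  -- for p in parts: the inner range loop appends p and breaks at the first mismatch,
  -- i.e. appends p exactly once iff some i in range(len(ref_parts)) mismatches.
  -- parts[p] is ported as getD (p is a key of parts, so no KeyError);
  -- list indexing [i] as getD (i < len(ref_parts) ≤ len(parts[p]), so no IndexError).
  let toremove : List String :=
    parts.keys.foldl (fun toremove p =>
      if (List.range ref_parts.length).any (fun i =>
            !(PySem.Str.slice ((parts.getD p []).getD i "") none
                (some (PySem.Str.len (ref_parts.getD i ""))) == ref_parts.getD i ""))
      then toremove ++ [p] else toremove) []
  let parts := toremove.foldl (fun parts p => parts.erase p) parts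
  parts.keys

-- ===== PORT B =====
-- one narrowing stage: keep candidates whose next part starts with r, consume that part
def pvStage (r : String) (pool : List (String × List String)) : List (String × List String) :=
  (pool.filter (fun nc => !nc.2.isEmpty && PySem.Str.startswith (nc.2.headD "") r)).map
    (fun nc => (nc.1, nc.2.tail))

def search_abbr_alt (keyword : String) (data : List String) : List String :=
  let pool0 := data.map (fun n => (n, pvSplitNE n))
  let pool := (pvSplitNE keyword).foldl (fun pool r => pvStage r pool) pool0
  -- out, seen = [], set(); append each surviving name not yet seen
  (pool.foldl (fun (st : List String × PySem.Set String) nc =>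
      if PySem.Set.contains st.2 nc.1 then st
      else (st.1 ++ [nc.1], PySem.Set.add st.2 nc.1)) ([], [])).1

-- ===== PRECONDITION & SPEC =====
def Spec_search_abbr (keyword : String) (data : List String) (out : List String) : Prop := out = search_abbr_alt keyword data
instance (keyword : String) (data : List String) (out : List String) : Decidable (Spec_search_abbr keyword data out) := by unfold Spec_search_abbr; infer_instance

-- ===== CLAIM (what is proved, stated in full; the proofs are below) =====
def Claim_equal_search_abbr : Prop := ∀ (keyword : String) (data : List String), Dom_search_abbr keyword data → Spec_search_abbr keyword data (search_abbr keyword data)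

-- ===== LEMMAS AND PROOFS =====

-- recursive characterisation of "name parts match the keyword parts"
def pvMatchRec : List String → List String → Bool
  | [], _ => true
  | _ :: _, [] => false
  | r :: rs, q :: qs => PySem.Str.startswith q r && pvMatchRec rs qs

-- s[:len(r)] == r is exactly s.startswith(r)
lemma pv_slice_startswith (q r : String) :
    (PySem.Str.slice q none (some (PySem.Str.len r)) == r) = PySem.Str.startswith q r := by
  rw [Bool.eq_iff_iff]
  simp only [PySem.Str.slice, PySem.Str.len, PySem.Str.startswith, beq_iff_eq,
    PySem.Chars.startswith_iff, List.prefix_iff_eq_take, PySem.Chars.slice,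
    PySem.List.slice_to_natCast, ← String.toList_inj, String.toList_ofList]
  exact ⟨fun h => h.symm, fun h => h.symm⟩

-- lookup in a dict built by inserting g i at key i, for each i of l
lemma pv_getD_foldl_insert (g : String → List String) :
    ∀ (l : List String) (d : PySem.Dict String (List String)) (p : String),
      (l.foldl (fun d i => d.insert i (g i)) d).getD p [] = if p ∈ l then g p else d.getD p [] := by
  intro l
  induction l with
  | nil => simp
  | cons x t ih =>
    intro d p
    rw [List.foldl_cons, ih, PySem.Dict.getD_insert]
    by_cases ht : p ∈ t
    · simp [ht]
    · by_cases hx : p = x <;> simp [ht, hx]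

lemma pv_keys_erase (d : PySem.Dict String (List String)) (k : String) :
    (d.erase k).keys = d.keys.filter (fun x => !(x == k)) := by
  simp only [PySem.Dict.erase, PySem.Dict.keys]
  induction d.items with
  | nil => simp
  | cons p t ih => by_cases h : p.1 == k <;> simp [h, ih]

lemma pv_keys_foldl_erase :
    ∀ (l : List String) (d : PySem.Dict String (List String)),
      (l.foldl (fun d p => d.erase p) d).keys = d.keys.filter (fun k => !(l.contains k)) := by
  intro l
  induction l with
  | nil => simp
  | cons x t ih =>
    intro d
    rw [List.foldl_cons, ih, pv_keys_erase, List.filter_filter]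
    apply List.filter_congr
    intro a _
    by_cases hx : a == x <;> by_cases htc : t.contains a <;> simp_all

-- A's per-key test (length gate + range scan) agrees pointwise with pvMatchRec
lemma pv_matchRec_range :
    ∀ (a b : List String),
      (decide (a.length ≤ b.length)
        && !((List.range a.length).any (fun j =>
              !(PySem.Str.startswith (b.getD j "") (a.getD j "")))))
        = pvMatchRec a b := by
  intro a
  induction a with
  | nil => intro b; simp [pvMatchRec]
  | cons r rs ih =>
    intro b
    cases b with
    | nil => simp [pvMatchRec]
    | cons q qs =>
      rw [show pvMatchRec (r :: rs) (q :: qs)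
            = (PySem.Str.startswith q r && pvMatchRec rs qs) from rfl, ← ih qs]
      simp only [List.length_cons, List.range_succ_eq_map, List.any_cons, List.any_map,
        Function.comp_def, List.getD_cons_zero, List.getD_cons_succ,
        Nat.add_le_add_iff_right]
      by_cases h : rs.length ≤ qs.length <;>
        by_cases hs : PySem.Str.startswith q r = true <;> simp_all

-- the narrowing stages compute exactly a pvMatchRec filter (plus consuming the parts)
lemma pv_narrow :
    ∀ (ref : List String) (pool : List (String × List String)),
      ref.foldl (fun pool r => pvStage r pool) pool
        = (pool.filter (fun nc => pvMatchRec ref nc.2)).map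
            (fun nc => (nc.1, nc.2.drop ref.length)) := by
  intro ref
  induction ref with
  | nil =>
    intro pool
    simp [pvMatchRec]
  | cons r rs ih =>
    intro pool
    have key : ∀ pool : List (String × List String),
        ((pvStage r pool).filter (fun nc => pvMatchRec rs nc.2)).map
            (fun nc => (nc.1, nc.2.drop rs.length))
          = (pool.filter (fun nc => pvMatchRec (r :: rs) nc.2)).map
              (fun nc => (nc.1, nc.2.drop (rs.length + 1))) := by
      intro pool
      induction pool with
      | nil => simp [pvStage]
      | cons nc pool' ihp =>
        rw [show pvStage r (nc :: pool')
              = (if (!nc.2.isEmpty && PySem.Str.startswith (nc.2.headD "") r)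
                  then [(nc.1, nc.2.tail)] else []) ++ pvStage r pool' from by
            simp only [pvStage, List.filter_cons]
            split <;> simp]
        cases h2 : nc.2 with
        | nil => simpa [pvMatchRec, h2] using ihp
        | cons q qs =>
          by_cases hs : PySem.Chars.startswith q.toList r.toList = true <;>
            by_cases hm : pvMatchRec rs qs = true <;>
              simp [pvMatchRec, h2, hs, hm, ihp, PySem.Str.startswith]
    rw [List.foldl_cons, ih, List.length_cons]
    exact key pool

-- the explicit out/seen loop is dict.fromkeys-style dedup
lemma pv_seen_fold :
    ∀ (l s : List String),
      (l.foldl (fun (st : List String × PySem.Set String) n =>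
          if PySem.Set.contains st.2 n then st
          else (st.1 ++ [n], PySem.Set.add st.2 n)) (s, s))
        = (l.foldl PySem.Set.add s, l.foldl PySem.Set.add s) := by
  intro l
  induction l with
  | nil => intro s; simp
  | cons x t ih =>
    intro s
    rw [List.foldl_cons, List.foldl_cons]
    by_cases h : PySem.Set.contains s x
    · rw [if_pos h, show PySem.Set.add s x = s from by simp [PySem.Set.add]; simpa using h]
      exact ih s
    · rw [if_neg h, show PySem.Set.add s x = s ++ [x] from by simp [PySem.Set.add]; simpa using h]
      exact ih (s ++ [x])

-- B's whole pipeline after the stages: project the names, dedup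
lemma pv_bside (ref : List String) (data : List String) :
    ((((data.map fun n => (n, pvSplitNE n)).filter fun nc => pvMatchRec ref nc.2).map
        fun nc => (nc.1, nc.2.drop ref.length)).foldl
      (fun (st : List String × PySem.Set String) nc =>
        if PySem.Set.contains st.2 nc.1 then st
        else (st.1 ++ [nc.1], PySem.Set.add st.2 nc.1)) ([], [])).1
    = PySem.List.dedup (data.filter fun n => pvMatchRec ref (pvSplitNE n)) := by
  have hfold : ∀ (l : List (String × List String)) (st : List String × PySem.Set String),
      l.foldl (fun st nc =>
          if PySem.Set.contains st.2 nc.1 then st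
          else (st.1 ++ [nc.1], PySem.Set.add st.2 nc.1)) st
        = (l.map Prod.fst).foldl (fun st n =>
            if PySem.Set.contains st.2 n then st
            else (st.1 ++ [n], PySem.Set.add st.2 n)) st := by
    intro l
    induction l with
    | nil => intro st; rfl
    | cons nc t iht => intro st; simp only [List.foldl_cons, List.map_cons]; rw [iht]
  have hnames : (((data.map fun n => (n, pvSplitNE n)).filter fun nc => pvMatchRec ref nc.2).map
        fun nc => (nc.1, nc.2.drop ref.length)).map Prod.fst
      = data.filter fun n => pvMatchRec ref (pvSplitNE n) := by
    induction data with
    | nil => rfl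
    | cons n t iht =>
      simp only [List.map_cons, List.filter_cons]
      by_cases h : pvMatchRec ref (pvSplitNE n) <;> simp [h, iht]
  rw [hfold, hnames, pv_seen_fold]
  simp [PySem.List.dedup, PySem.Set.ofList_eq_foldl]

lemma pv_filter_add (q : String → Bool) (s : List String) (x : String) :
    (PySem.Set.add s x).filter q = if q x then PySem.Set.add (s.filter q) x else s.filter q := by
  by_cases hq : q x <;> by_cases hx : PySem.Set.contains s x <;>
    simp_all [PySem.Set.add, List.mem_filter, List.filter_append]

lemma pv_foldl_add_filter (q : String → Bool) :
    ∀ (l s : List String),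
      (l.foldl PySem.Set.add s).filter q = (l.filter q).foldl PySem.Set.add (s.filter q) := by
  intro l
  induction l with
  | nil => simp
  | cons x t ih =>
    intro s
    rw [List.foldl_cons, ih, pv_filter_add, List.filter_cons]
    by_cases hq : q x <;> simp [hq]

lemma pv_dedup_filter (q : String → Bool) (xs : List String) :
    (PySem.List.dedup xs).filter q = PySem.List.dedup (xs.filter q) := by
  simp only [PySem.List.dedup, PySem.Set.ofList_eq_foldl]
  simpa using pv_foldl_add_filter q xs []

-- ===== VERDICT (by name: the statement is the Claim_ definition above) =====
theorem search_abbr_spec : Claim_equal_search_abbr := by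
  intro keyword data _
  unfold Spec_search_abbr search_abbr search_abbr_alt
  simp only []
  set ref := pvSplitNE keyword with href
  set c1 : String → Bool := fun i => decide (ref.length ≤ (pvSplitNE i).length) with hc1
  have hfold :
      (data.foldl (fun parts i =>
        if ref.length ≤ (pvSplitNE i).length then parts.insert i (pvSplitNE i) else parts)
        PySem.Dict.empty)
      = (data.filter c1).foldl (fun d i => d.insert i (pvSplitNE i)) PySem.Dict.empty := by
    simpa using PySem.List.foldl_ite_eq_foldl_filter
      (fun i => ref.length ≤ (pvSplitNE i).length)
      (fun d i => d.insert i (pvSplitNE i)) data PySem.Dict.empty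
  rw [hfold]
  set D := data.filter c1 with hD
  set parts := D.foldl (fun d i => d.insert i (pvSplitNE i)) PySem.Dict.empty with hparts
  have hkeys : parts.keys = PySem.List.dedup D := by
    rw [hparts, PySem.Dict.keys_foldl_insert, PySem.Dict.keys_empty,
      PySem.Set.update_nil_left]
    simp
  have hget : ∀ p ∈ parts.keys, parts.getD p [] = pvSplitNE p := by
    intro p hp
    rw [hkeys] at hp
    have hpD : p ∈ D := by simpa [PySem.List.dedup, PySem.Set.mem_ofList] using hp
    rw [hparts, pv_getD_foldl_insert]
    simp [hpD]
  set badf : String → Bool := fun p => (List.range ref.length).any (fun j =>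
      !(PySem.Str.startswith ((pvSplitNE p).getD j "") (ref.getD j ""))) with hbadf
  have htorem :
      (parts.keys.foldl (fun toremove p =>
          if (List.range ref.length).any (fun i =>
                !(PySem.Str.slice ((parts.getD p []).getD i "") none
                    (some (PySem.Str.len (ref.getD i ""))) == ref.getD i ""))
          then toremove ++ [p] else toremove) [])
        = parts.keys.filter badf := by
    rw [PySem.List.foldl_congr_mem _ _
        (fun acc p => if badf p then acc ++ [p] else acc) _
        (by
          intro acc p hp
          rw [hget p hp]
          simp only [hbadf, pv_slice_startswith])]
    exact PySem.List.foldl_append_if_eq_filter badf parts.keys []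
  rw [htorem, pv_keys_foldl_erase]
  have hfin : parts.keys.filter (fun k => !((parts.keys.filter badf).contains k))
      = parts.keys.filter (fun k => !(badf k)) := by
    apply List.filter_congr
    intro k hk
    simp [hk]
  rw [hfin, hkeys, pv_dedup_filter, hD, List.filter_filter]
  rw [pv_narrow, pv_bside]
  exact congrArg PySem.List.dedup (List.filter_congr fun i _ => by
    rw [Bool.and_comm]
    exact pv_matchRec_range ref (pvSplitNE i))
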